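-- pv_equiv track=rewrite | github.com/6210qwe/learning-notes | 爬虫程序/测试软件/demo2/demo2/展示代码.py | _in_string
-- ===== SOURCE A (Python) =====
-- def _in_string(line):
--     """检查当前位置是否在字符串中"""
--     # 简单的字符串检测，用于判断冒号是否在字符串内
--     in_single_quote = False
--     in_double_quote = False
--
--     for c in line:
--         if c == "'" and not in_double_quote:
--             in_single_quote = not in_single_quote
--         elif c == '"' and not in_single_quote:
--             in_double_quote = not in_double_quote
--
--     return in_single_quote or in_double_quote
-- ===== SOURCE B (Python) =====
-- def _in_string(line):
--     """检查当前位置是否在字符串中"""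
--     # Skip-scan: repeatedly locate the next opening quote, then jump straight
--     # to its matching closing quote with str.find, and continue after the
--     # closed segment; no per-character flag state is maintained.
--     while True:
--         i = next((k for k, c in enumerate(line) if c in ("'", '"')), -1)
--         if i == -1:
--             return False
--         j = line.find(line[i], i + 1)
--         if j == -1:
--             return True
--         line = line[j + 1:]
-- ===== Notes on version B (the rewrite author's own statement) =====
-- stated objective: alternative
-- what changed: Replaces A's per-character two-boolean toggling with a skip-scan that locates each opening quote, jumps directly to its matching closing quote with str.find, and loops on the slice after the closed segment.
import Mathlib
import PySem

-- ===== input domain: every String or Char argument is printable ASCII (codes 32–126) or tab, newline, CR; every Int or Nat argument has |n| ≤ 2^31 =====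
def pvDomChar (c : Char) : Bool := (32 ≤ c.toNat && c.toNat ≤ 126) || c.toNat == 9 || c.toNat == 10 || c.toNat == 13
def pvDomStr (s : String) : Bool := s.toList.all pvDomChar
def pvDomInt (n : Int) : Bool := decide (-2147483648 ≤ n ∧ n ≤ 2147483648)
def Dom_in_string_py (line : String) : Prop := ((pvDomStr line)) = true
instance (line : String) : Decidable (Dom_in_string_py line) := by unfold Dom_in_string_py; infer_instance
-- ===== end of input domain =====

-- B replaces A's per-character two-flag toggling with a skip-scan that jumps
-- from each opening quote straight to its matching closing quote and recurses
-- on the remainder; objective: alternative (same O(n) cost).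

-- ===== PORT A =====
-- loop body of A: carries (in_single_quote, in_double_quote), branches in A's order
def pvStepA (s : Bool × Bool) (c : Char) : Bool × Bool :=
  if c = '\'' ∧ ¬ s.2 then (!s.1, s.2)
  else if c = '"' ∧ ¬ s.1 then (s.1, !s.2)
  else s

def in_string_py (line : String) : Bool :=
  let st := line.toList.foldl pvStepA (false, false)
  st.1 || st.2

-- ===== PORT B =====
-- `c in ("'", '"')` of Source B
def pvIsQuote (c : Char) : Bool := c == '\'' || c == '"'

-- Source B's while-loop: find the next opening quote (next(... enumerate ...)),
-- find its matching close (line.find(line[i], i+1), ported as findIdx? on the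
-- suffix after i), then loop on the slice after the close.
def pvSkipScan (l : List Char) : Bool :=
  match h : l.findIdx? pvIsQuote with
  | none => false
  | some i =>
    let q := l[i]!
    let rest := l.drop (i + 1)
    match rest.findIdx? (fun c => c == q) with
    | none => true
    | some j => pvSkipScan (rest.drop (j + 1))
termination_by l.length
decreasing_by
  have hi : i < l.length := by
    rcases List.findIdx?_eq_some_iff_getElem.mp h with ⟨hi, _⟩
    exact hi
  simp only [List.length_drop]
  omega

def in_string_py_alt (line : String) : Bool := pvSkipScan line.toList

-- ===== PRECONDITION & SPEC =====
def Spec_in_string_py (line : String) (out : Bool) : Prop := out = in_string_py_alt line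
instance (line : String) (out : Bool) : Decidable (Spec_in_string_py line out) := by unfold Spec_in_string_py; infer_instance

-- ===== CLAIM (what is proved, stated in full; the proofs are below) =====
def Claim_equal_in_string_py : Prop := ∀ (line : String), Dom_in_string_py line → Spec_in_string_py line (in_string_py line)

-- ===== LEMMAS AND PROOFS =====

-- A's flag pair while inside a q-quoted string
def pvInside (q : Char) : Bool × Bool := if q = '\'' then (true, false) else (false, true)

theorem pvStepA_nonquote (s : Bool × Bool) (c : Char) (h : pvIsQuote c = false) :
    pvStepA s c = s := by
  simp only [pvIsQuote, Bool.or_eq_false_iff, beq_eq_false_iff_ne, ne_eq] at h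
  simp [pvStepA, h.1, h.2]

theorem pvStepA_open (q : Char) (h : pvIsQuote q = true) :
    pvStepA (false, false) q = pvInside q := by
  simp only [pvIsQuote, Bool.or_eq_true_iff, beq_iff_eq] at h
  rcases h with h | h <;> subst h <;> simp [pvStepA, pvInside]

theorem pvStepA_inside (q c : Char) (hq : pvIsQuote q = true) (hc : c ≠ q) :
    pvStepA (pvInside q) c = pvInside q := by
  simp only [pvIsQuote, Bool.or_eq_true_iff, beq_iff_eq] at hq
  rcases hq with h | h <;> subst h <;>
    by_cases h1 : c = '\'' <;> by_cases h2 : c = '"' <;>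
      simp_all [pvStepA, pvInside]

theorem pvStepA_close (q : Char) (hq : pvIsQuote q = true) :
    pvStepA (pvInside q) q = (false, false) := by
  simp only [pvIsQuote, Bool.or_eq_true_iff, beq_iff_eq] at hq
  rcases hq with h | h <;> subst h <;> simp [pvStepA, pvInside]

theorem pvFoldA_fixed (s : Bool × Bool) (t : List Char) (h : ∀ c ∈ t, pvStepA s c = s) :
    t.foldl pvStepA s = s := by
  induction t with
  | nil => rfl
  | cons c t ih =>
    simp only [List.foldl_cons, h c (List.mem_cons_self)]
    exact ih (fun c hc => h c (List.mem_cons_of_mem _ hc))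

theorem pvTake_all {p : Char → Bool} (l : List Char) (i : ℕ)
    (h : ∀ j (hj : j < l.length), j < i → p l[j] = false) :
    ∀ c ∈ l.take i, p c = false := by
  intro c hc
  obtain ⟨j, hj, rfl⟩ := List.mem_iff_getElem.mp hc
  rw [List.getElem_take]
  have hlen : j < i ∧ j < l.length := by
    have := hj; simp [List.length_take] at this; omega
  exact h j hlen.2 hlen.1

-- main invariant: A's fold computes exactly B's skip-scan
theorem pvKey : ∀ (n : ℕ) (l : List Char), l.length ≤ n →
    (((l.foldl pvStepA (false, false)).1 || (l.foldl pvStepA (false, false)).2) = pvSkipScan l) := by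
  intro n
  induction n with
  | zero =>
    intro l hl
    have : l = [] := List.eq_nil_of_length_eq_zero (Nat.le_zero.mp hl)
    subst this
    simp [pvSkipScan]
  | succ n ih =>
    intro l hl
    rw [pvSkipScan]
    split
    case h_1 h1 =>
      have hall : ∀ c ∈ l, pvIsQuote c = false := List.findIdx?_eq_none_iff.mp h1
      rw [pvFoldA_fixed _ _ (fun c hc => pvStepA_nonquote _ c (hall c hc))]
      simp
    case h_2 i h1 =>
      obtain ⟨hi, hqi, hpre⟩ := List.findIdx?_eq_some_iff_getElem.mp h1
      have hdec : l = l.take i ++ l[i] :: l.drop (i + 1) := by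
        rw [List.getElem_cons_drop, List.take_append_drop]
      have hfold1 : l.foldl pvStepA (false, false)
          = (l.drop (i + 1)).foldl pvStepA (pvInside l[i]) := by
        conv_lhs => rw [hdec]
        rw [List.foldl_append, List.foldl_cons,
          pvFoldA_fixed _ _ (fun c hc => pvStepA_nonquote _ c
            (pvTake_all l i (fun j hj hji => by simpa using hpre j hji) c hc)),
          pvStepA_open _ hqi]
      have hq! : l[i]! = l[i] := by
        rw [List.getElem!_eq_getElem?_getD, List.getElem?_eq_getElem hi]
        rfl
      simp only [hq!]
      split
      case h_1 h2 =>
        have hall : ∀ c ∈ l.drop (i + 1), (c == l[i]) = false :=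
          List.findIdx?_eq_none_iff.mp h2
        rw [hfold1, pvFoldA_fixed _ _ (fun c hc => pvStepA_inside _ c hqi
          (by simpa using hall c hc))]
        simp only [pvIsQuote, Bool.or_eq_true_iff, beq_iff_eq] at hqi
        rcases hqi with h | h <;> rw [h] <;> simp [pvInside]
      case h_2 j h2 =>
        obtain ⟨hj, hqj, hpre2⟩ := List.findIdx?_eq_some_iff_getElem.mp h2
        have hqj' : (l.drop (i + 1))[j] = l[i] := by simpa using hqj
        have hdec2 : l.drop (i + 1)
            = (l.drop (i + 1)).take j ++ (l.drop (i + 1))[j] :: (l.drop (i + 1)).drop (j + 1) := by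
          rw [List.getElem_cons_drop, List.take_append_drop]
        have hfold2 : (l.drop (i + 1)).foldl pvStepA (pvInside l[i])
            = ((l.drop (i + 1)).drop (j + 1)).foldl pvStepA (false, false) := by
          conv_lhs => rw [hdec2]
          rw [List.foldl_append, List.foldl_cons,
            pvFoldA_fixed _ _ (fun c hc => pvStepA_inside _ c hqi
              (by
                have ht := pvTake_all (p := fun c => c == l[i]) (l.drop (i + 1)) j
                  (fun k hk hkj => by simpa using hpre2 k hkj) c hc
                simpa using ht)),
            hqj', pvStepA_close _ hqi]
        rw [hfold1, hfold2]
        exact ih _ (by simp only [List.length_drop] at hl ⊢; omega)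

-- ===== VERDICT (by name: the statement is the Claim_ definition above) =====
theorem in_string_py_spec : Claim_equal_in_string_py := by
  intro line _
  unfold Spec_in_string_py in_string_py in_string_py_alt
  exact pvKey line.toList.length line.toList (le_refl _)
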